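-- pv_equiv track=rewrite | github.com/Central-University-IT-prod/2025-final-command-team-44-Prod-Backend | app/utils/alg.py | max_zeros_between_ones
-- ===== SOURCE A (Python) =====
-- def max_zeros_between_ones(arr):
--     indices_of_ones = [i for i, x in enumerate(arr) if x == 1]
--     if len(indices_of_ones) < 2:
--         return 0
--     max_zeros = 0
--     for i in range(1, len(indices_of_ones)):
--         zeros_between = indices_of_ones[i] - indices_of_ones[i - 1] - 1
--         max_zeros = max(max_zeros, zeros_between)
--     return max_zeros
-- ===== SOURCE B (Python) =====
-- def max_zeros_between_ones(arr):
--     last_one = -1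
--     max_zeros = 0
--     for i, x in enumerate(arr):
--         if x == 1:
--             if last_one >= 0:
--                 max_zeros = max(max_zeros, i - last_one - 1)
--             last_one = i
--     return max_zeros
-- ===== Notes on version B (the rewrite author's own statement) =====
-- stated objective: simpler
-- what changed: Single pass over enumerate(arr) keeping only the previous one's index and the running maximum, instead of first materialising the list of all one-indices and then scanning it with ranged indexing.
import Mathlib
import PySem

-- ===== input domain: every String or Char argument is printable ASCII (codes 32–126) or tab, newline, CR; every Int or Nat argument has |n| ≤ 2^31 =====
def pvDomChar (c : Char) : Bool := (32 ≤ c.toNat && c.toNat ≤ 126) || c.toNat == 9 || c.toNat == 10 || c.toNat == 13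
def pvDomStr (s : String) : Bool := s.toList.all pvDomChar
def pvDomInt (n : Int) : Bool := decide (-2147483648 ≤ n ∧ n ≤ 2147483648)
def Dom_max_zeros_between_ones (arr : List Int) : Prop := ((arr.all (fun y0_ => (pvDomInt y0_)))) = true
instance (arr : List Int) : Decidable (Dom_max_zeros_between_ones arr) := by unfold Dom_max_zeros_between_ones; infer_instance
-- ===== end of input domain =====

-- B replaces A's two passes (collect the index list of the ones, then scan it
-- with ranged indexing) by one pass that keeps only the previous one's index
-- and the running maximum (simpler, O(1) extra space).

-- ===== PORT A =====
def max_zeros_between_ones (arr : List Int) : Int :=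
  let indices_of_ones : List Int :=
    (PySem.List.enumerate arr 0).filterMap (fun p => if p.2 = 1 then some p.1 else none)
  if indices_of_ones.length < 2 then 0
  else
    (PySem.List.pyRange 1 indices_of_ones.length 1).foldl
      (fun max_zeros i =>
        max max_zeros
          (PySem.List.pyGetD indices_of_ones i 0 - PySem.List.pyGetD indices_of_ones (i - 1) 0 - 1))
      0

-- ===== PORT B =====
def max_zeros_between_ones_alt (arr : List Int) : Int :=
  ((PySem.List.enumerate arr 0).foldl
    (fun st p =>
      if p.2 = 1 then
        (p.1, if 0 ≤ st.1 then max st.2 (p.1 - st.1 - 1) else st.2)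
      else st)
    (-1, 0)).2

-- ===== PRECONDITION & SPEC =====
def Spec_max_zeros_between_ones (arr : List Int) (out : Int) : Prop := out = max_zeros_between_ones_alt arr
instance (arr : List Int) (out : Int) : Decidable (Spec_max_zeros_between_ones arr out) := by unfold Spec_max_zeros_between_ones; infer_instance

-- ===== CLAIM (what is proved, stated in full; the proofs are below) =====
def Claim_equal_max_zeros_between_ones : Prop := ∀ (arr : List Int), Dom_max_zeros_between_ones arr → Spec_max_zeros_between_ones arr (max_zeros_between_ones arr)

-- ===== LEMMAS AND PROOFS =====

-- maxGap prev m l : fold over adjacent gaps; common reference for both loops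
def maxGap : Int → Int → List Int → Int
  | _, m, [] => m
  | prev, m, i :: t => maxGap i (max m (i - prev - 1)) t

-- B's one-element step, on an index of a one
def gstep (st : Int × Int) (i : Int) : Int × Int :=
  (i, if 0 ≤ st.1 then max st.2 (i - st.1 - 1) else st.2)

lemma foldl_bstep_eq_filterMap (l : List (Int × Int)) (st : Int × Int) :
    l.foldl (fun st p => if p.2 = 1 then
        (p.1, if 0 ≤ st.1 then max st.2 (p.1 - st.1 - 1) else st.2) else st) st
    = (l.filterMap (fun p => if p.2 = 1 then some p.1 else none)).foldl gstep st := by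
  induction l generalizing st with
  | nil => rfl
  | cons p t ih =>
    by_cases h : p.2 = 1 <;> simp [h, List.foldl_cons, ih, gstep]

lemma foldl_gstep_nonneg (l : List Int) (p m : Int) (hp : 0 ≤ p)
    (hl : ∀ i ∈ l, 0 ≤ i) :
    (l.foldl gstep (p, m)).2 = maxGap p m l := by
  induction l generalizing p m with
  | nil => rfl
  | cons i t ih =>
    simp only [List.foldl_cons, gstep, hp, if_pos, maxGap]
    exact ih i _ (hl i (by simp)) (fun j hj => hl j (by simp [hj]))

lemma ones_nonneg (arr : List Int) :
    ∀ i ∈ (PySem.List.enumerate arr 0).filterMap (fun p => if p.2 = 1 then some p.1 else none), 0 ≤ i := by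
  intro i hi
  rcases List.mem_filterMap.mp hi with ⟨p, hp, hpi⟩
  rcases (PySem.List.mem_enumerate_iff _ _ _).mp hp with ⟨k, hk, rfl⟩
  split_ifs at hpi with h
  simp at hpi; omega

-- A's indexed scan over pyRange (j+1) .. n equals maxGap from idx[j]
lemma arange_eq_maxGap (idx : List Int) (j : Nat) (hj : j < idx.length) (m : Int) :
    (PySem.List.pyRange ((j : Int) + 1) idx.length 1).foldl
      (fun mz i => max mz (PySem.List.pyGetD idx i 0 - PySem.List.pyGetD idx (i - 1) 0 - 1)) m
    = maxGap idx[j] m (idx.drop (j + 1)) := by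
  by_cases h : j + 1 < idx.length
  · rw [PySem.List.pyRange_one_cons (by omega)]
    simp only [List.foldl_cons]
    have e1 : PySem.List.pyGetD idx ((j : Int) + 1) 0 = idx[j + 1] := by
      rw [show ((j : Int) + 1) = ((j + 1 : Nat) : Int) by push_cast; ring]
      exact PySem.List.pyGetD_ofNat idx (j+1) 0 h
    have e2 : PySem.List.pyGetD idx ((j : Int) + 1 - 1) 0 = idx[j] := by
      rw [show ((j : Int) + 1 - 1) = ((j : Nat) : Int) by ring]
      exact PySem.List.pyGetD_ofNat idx j 0 hj
    have hdrop : idx.drop (j + 1) = idx[j + 1] :: idx.drop (j + 2) := by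
      rw [List.drop_eq_getElem_cons h]
    rw [e1, e2, hdrop, maxGap]
    have := arange_eq_maxGap idx (j + 1) h (max m (idx[j + 1] - idx[j] - 1))
    rw [show ((j : Int) + 1 + 1) = ((j + 1 : Nat) : Int) + 1 by push_cast; ring]
    rw [this]
  · have hn : j + 1 = idx.length := by omega
    rw [PySem.List.pyRange_one_eq_nil (by omega)]
    rw [List.drop_eq_nil_of_le (by omega)]
    rfl
termination_by idx.length - j

-- ===== VERDICT (by name: the statement is the Claim_ definition above) =====
theorem max_zeros_between_ones_spec : Claim_equal_max_zeros_between_ones := by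
  intro arr _
  unfold Spec_max_zeros_between_ones max_zeros_between_ones max_zeros_between_ones_alt
  rw [foldl_bstep_eq_filterMap]
  set ones := (PySem.List.enumerate arr 0).filterMap (fun p => if p.2 = 1 then some p.1 else none) with hones
  have hnn : ∀ i ∈ ones, 0 ≤ i := ones_nonneg arr
  match h : ones with
  | [] => rfl
  | [a] => rfl
  | a :: b :: t =>
    have hlen : ¬ (a :: b :: t).length < 2 := by simp
    simp only [hlen, if_false]
    have hB : ((a :: b :: t).foldl gstep (-1, 0)).2 = maxGap a 0 (b :: t) := by
      simp only [List.foldl_cons, gstep]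
      norm_num
      exact foldl_gstep_nonneg (b :: t) a 0 (hnn a (by simp))
        (fun j hj => hnn j (by simp at hj ⊢; tauto))
    rw [hB]
    have := arange_eq_maxGap (a :: b :: t) 0 (by simp) 0
    simpa using this
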